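-- pv_equiv track=rewrite | github.com/HybirdCorp/creme_crm | creme/manage.py | is_parallel_mode
-- ===== SOURCE A (Python) =====
-- def is_parallel_mode(argv):
--     if '--parallel' in argv:
--         return True
--
--     prefix = '--parallel='
--     for value in argv:
--         if value.startswith(prefix):
--             return value.removeprefix(prefix) != '1'
--
--     return False
-- ===== SOURCE B (Python) =====
-- def is_parallel_mode(argv):
--     result = None
--     for value in argv:
--         if value == '--parallel':
--             return True
--         if result is None and value.startswith('--parallel='):
--             result = value != '--parallel=1'
--     return result if result is not None else False
-- ===== Notes on version B (the rewrite author's own statement) =====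
-- stated objective: simpler
-- what changed: Replaced A's two scans (membership test for the bare flag, then a separate prefix loop with removeprefix) by one pass with an Option accumulator that returns early only on the bare flag and records the first '--parallel=' match as a direct string comparison.
import Mathlib
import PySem

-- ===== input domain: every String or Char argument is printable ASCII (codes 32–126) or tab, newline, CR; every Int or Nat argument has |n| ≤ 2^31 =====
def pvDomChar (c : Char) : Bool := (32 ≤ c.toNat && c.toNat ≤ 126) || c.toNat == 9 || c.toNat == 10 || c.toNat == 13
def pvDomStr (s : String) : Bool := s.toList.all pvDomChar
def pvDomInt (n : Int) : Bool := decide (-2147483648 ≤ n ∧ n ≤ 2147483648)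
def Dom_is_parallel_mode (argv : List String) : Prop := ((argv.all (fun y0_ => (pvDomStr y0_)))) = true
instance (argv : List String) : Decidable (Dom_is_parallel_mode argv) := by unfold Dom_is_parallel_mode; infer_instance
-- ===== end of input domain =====

-- B replaces A's two scans (bare-flag membership test + prefix loop) by one pass with an
-- Option accumulator; objective: simpler. Equivalence proved on all inputs.

-- ===== PORT A =====
-- value.removeprefix(prefix): exact — drops the prefix iff the string starts with it.
def pyRemovePrefix (s p : String) : String :=
  if PySem.Str.startswith s p then String.ofList (s.toList.drop p.toList.length) else s

-- the for-loop of A: first value starting with '--parallel=' decides, else False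
def isParLoopA : List String → Bool
  | [] => false
  | v :: rest =>
    if PySem.Str.startswith v "--parallel=" then
      decide (pyRemovePrefix v "--parallel=" ≠ "1")
    else isParLoopA rest

def is_parallel_mode (argv : List String) : Bool :=
  if argv.contains "--parallel" then true
  else isParLoopA argv

-- ===== PORT B =====
-- B's single pass with accumulator `result : Option Bool`
def isParLoopB : List String → Option Bool → Bool
  | [], result => result.getD false
  | v :: rest, result =>
    if v = "--parallel" then true
    else
      isParLoopB rest
        (if result.isNone && PySem.Str.startswith v "--parallel=" then
           some (decide (v ≠ "--parallel=1"))
         else result)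

def is_parallel_mode_alt (argv : List String) : Bool :=
  isParLoopB argv none

-- ===== PRECONDITION & SPEC =====
def Spec_is_parallel_mode (argv : List String) (out : Bool) : Prop := out = is_parallel_mode_alt argv
instance (argv : List String) (out : Bool) : Decidable (Spec_is_parallel_mode argv out) := by unfold Spec_is_parallel_mode; infer_instance

-- ===== CLAIM (what is proved, stated in full; the proofs are below) =====
def Claim_equal_is_parallel_mode : Prop := ∀ (argv : List String), Dom_is_parallel_mode argv → Spec_is_parallel_mode argv (is_parallel_mode argv)

-- ===== LEMMAS AND PROOFS =====

-- under the startswith guard, A's removeprefix comparison equals B's whole-string comparison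
lemma removePrefix_ne_one (v : String)
    (h : PySem.Str.startswith v "--parallel=" = true) :
    (pyRemovePrefix v "--parallel=" ≠ "1") ↔ (v ≠ "--parallel=1") := by
  have hpre : "--parallel=".toList <+: v.toList :=
    (PySem.Chars.startswith_iff _ _).1 (by simpa [PySem.Str.startswith] using h)
  obtain ⟨t, ht⟩ := hpre
  have hv : v = String.ofList ("--parallel=".toList ++ t) := by
    apply String.ext; simpa using ht.symm
  subst hv
  constructor <;> intro hne heq <;> apply hne <;>
    simp_all [pyRemovePrefix, String.ext_iff, PySem.Str.startswith,
      PySem.Chars.startswith_iff]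

-- invariant of B's single pass: a bare flag anywhere wins; otherwise the accumulator
-- (if set) or A's prefix loop decides
lemma isParLoopB_eq (l : List String) :
    ∀ r : Option Bool,
      isParLoopB l r =
        if l.contains "--parallel" then true
        else match r with
          | some b => b
          | none => isParLoopA l := by
  induction l with
  | nil => intro r; cases r <;> simp [isParLoopB, isParLoopA]
  | cons v rest ih =>
    intro r
    by_cases hv : v = "--parallel"
    · simp [isParLoopB, hv]
    · have hv' : ¬ ("--parallel" = v) := fun h => hv h.symm
      cases r with
      | some b => simp [isParLoopB, hv, hv', ih]
      | none =>
        by_cases hsw : PySem.Str.startswith v "--parallel=" = true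
        · have hd : (decide (v ≠ "--parallel=1")) = decide (pyRemovePrefix v "--parallel=" ≠ "1") := by
            simp [removePrefix_ne_one v hsw]
          have hsw' : PySem.Chars.startswith v.toList
              ['-','-','p','a','r','a','l','l','e','l','='] = true := by
            simpa [PySem.Str.startswith] using hsw
          simp [isParLoopB, isParLoopA, hv, hv', ih, hd, hsw']
        · have hsw' : PySem.Chars.startswith v.toList
              ['-','-','p','a','r','a','l','l','e','l','='] = false := by
            simpa [PySem.Str.startswith] using hsw
          simp [isParLoopB, isParLoopA, hv, hv', ih, hsw']

-- ===== VERDICT (by name: the statement is the Claim_ definition above) =====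
theorem is_parallel_mode_spec : Claim_equal_is_parallel_mode := by
  intro argv _
  unfold Spec_is_parallel_mode is_parallel_mode is_parallel_mode_alt
  rw [isParLoopB_eq]
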